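-- pv_equiv track=rewrite | github.com/ruediger/esp32-stuff | ssd1306/main/generate_glyphs.py | render_template
-- ===== SOURCE A (Python) =====
-- from typing import List, Sequence
--
-- _TEMPLATE = """\
-- #ifndef FONT{size}_HPP
-- #define FONT{size}_HPP
--
-- namespace font{size} {{
--   const size_t width = {width};
--   const size_t height = {height};
--   const uint8_t glyphs[][{length}] = {data};
-- }}
--
-- #endif\
-- """
--
-- def split_glyph(d: str) -> (int, int, List[str]):
--     """Split glyph and return width, height, and glyph broken into lines."""
--     lines = d.split('\n')
--     if len(lines) == 0:
--         return (0, 0, [])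
--     while len(lines[0]) == 0:  # Remove empty frist line if char starts with \n
--         lines.pop(0)
--     height = len(lines)
--     width = max([len(line) for line in lines])
--     return (width, height, lines)
--
-- def set_pixel(buffer: Sequence[int], width: int, x: int, y: int) -> None:
--     """Set pixel at x,y in buffer with width."""
--     buffer[x + y//8 * width] |= 1 << (y & 7)
--
-- def buffer_size(width: int, height: int) -> int:
--     """Return buffer size."""
--     return width * ((height + 7) // 8)
--
-- def to_buffer(d: str) -> List[int]:
--     """Convert text representation into binary (SSD1306) format."""
--     width, height, lines = split_glyph(d)
--     buffer = [0] * buffer_size(width, height)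
--     x = 0
--     y = 0
--     for line in lines:
--         for c in line:
--             if c != ' ':
--                 set_pixel(buffer, width, x, y)
--             x += 1
--         y += 1
--         x = 0
--     return buffer
--
-- def format_seq(buffer: Sequence[int]) -> str:
--     """Format sequence as C++ binary array."""
--     return '{' + ', '.join([f'0b{i:08b}' for i in buffer]) + '}'
--
-- def render_template(glyphs: Sequence[str]) -> str:
--     """Formats template using glyphs."""
--     width, height, _ = split_glyph(glyphs[0])
--
--     data = [format_seq(to_buffer(d)) for d in glyphs]
--
--     return _TEMPLATE.format(
--         data='{\n    ' + ',\n    '.join(data) + '\n  }',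
--         size=f'{width}x{height}',
--         width=width,
--         height=height,
--         length=buffer_size(width, height))
-- ===== SOURCE B (Python) =====
-- # B: output-driven renderer -- builds each output byte string directly by gathering
-- # the 8 pixels of its page column, instead of OR-ing pixels into a mutable buffer.
-- from typing import List, Sequence
--
--
-- def split_glyph(d: str) -> (int, int, List[str]):
--     """Split glyph and return width, height, and glyph broken into lines."""
--     lines = d.split('\n')
--     if len(lines) == 0:
--         return (0, 0, [])
--     while len(lines[0]) == 0:  # Remove empty first line if char starts with \n
--         lines.pop(0)
--     height = len(lines)
--     width = max([len(line) for line in lines])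
--     return (width, height, lines)
--
--
-- def _glyph_bytes(d: str) -> List[str]:
--     """Each output byte of the SSD1306 buffer, already formatted as '0b........'."""
--     width, height, lines = split_glyph(d)
--     out = []
--     for p in range((height + 7) // 8):
--         for x in range(width):
--             bits = []
--             for b in range(7, -1, -1):
--                 y = p * 8 + b
--                 on = y < height and x < len(lines[y]) and lines[y][x] != ' '
--                 bits.append('1' if on else '0')
--             out.append('0b' + ''.join(bits))
--     return out
--
--
-- def render_template(glyphs: Sequence[str]) -> str:
--     """Formats template using glyphs."""
--     width, height, _ = split_glyph(glyphs[0])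
--     size = f'{width}x{height}'
--     length = width * ((height + 7) // 8)
--     body = ',\n    '.join('{' + ', '.join(_glyph_bytes(d)) + '}' for d in glyphs)
--     return (f'#ifndef FONT{size}_HPP\n'
--             f'#define FONT{size}_HPP\n'
--             f'\n'
--             f'namespace font{size} {{\n'
--             f'  const size_t width = {width};\n'
--             f'  const size_t height = {height};\n'
--             f'  const uint8_t glyphs[][{length}] = {{\n'
--             f'    {body}\n'
--             f'  }};\n'
--             f'}}\n'
--             f'\n'
--             f'#endif')
-- ===== Notes on version B (the rewrite author's own statement) =====
-- stated objective: alternative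
-- what changed: The per-glyph conversion is rewritten output-driven: instead of initializing a zero buffer and OR-ing a bit into it for every non-space pixel while scanning rows, B walks the output positions (page, column) and assembles each byte's 8 bits directly from the relevant rows, emitting the formatted '0b...' strings without any intermediate mutable buffer.
import Mathlib
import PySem

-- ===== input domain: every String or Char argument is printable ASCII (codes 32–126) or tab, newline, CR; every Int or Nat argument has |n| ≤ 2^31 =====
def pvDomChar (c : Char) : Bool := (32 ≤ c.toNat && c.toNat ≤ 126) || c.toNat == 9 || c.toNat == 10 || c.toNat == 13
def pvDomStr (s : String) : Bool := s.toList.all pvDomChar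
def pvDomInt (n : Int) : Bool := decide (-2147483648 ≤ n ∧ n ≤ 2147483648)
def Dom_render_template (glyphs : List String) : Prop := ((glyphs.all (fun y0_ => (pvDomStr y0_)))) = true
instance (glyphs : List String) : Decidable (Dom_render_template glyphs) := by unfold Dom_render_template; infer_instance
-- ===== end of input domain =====

-- B rebuilds each output byte directly from its 8 pixel rows (output-driven) instead of
-- OR-ing every set pixel into a mutable buffer; a different traversal with the same result.

-- ===== PORT A =====
-- helper split_glyph (identical source code in Source A and Source B, so shared by both ports);
-- strings are handled on the List Char side throughout, per the PySem convention.

-- the `while len(lines[0]) == 0: lines.pop(0)` loop; on [] Python raises IndexError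
-- (excluded by Pre_render_template), here it just stops.
def pvDropEmpty : List (List Char) → List (List Char)
  | [] => []
  | l :: ls => if l = [] then pvDropEmpty ls else l :: ls

-- max([len(line) for line in lines]); Python max raises ValueError on an empty list
-- (excluded by Pre_render_template), here it yields 0.
def pvMaxLen (lines : List (List Char)) : Nat :=
  lines.foldl (fun acc l => max acc l.length) 0

def pvSplitGlyph (d : String) : Nat × Nat × List (List Char) :=
  let lines := PySem.Chars.splitOn d.toList ['\n']
  if lines.length = 0 then (0, 0, [])
  else
    let lines := pvDropEmpty lines
    (pvMaxLen lines, lines.length, lines)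

-- f'{i:08b}' for a nonnegative int: binary digits (repeated halving) left-padded to 8.
def pvBits : Nat → Nat → List Char
  | 0, _ => []
  | f + 1, n => if n = 0 then [] else pvBits f (n / 2) ++ [if n % 2 = 1 then '1' else '0']

def pvBin8 (n : Nat) : List Char :=
  let ds := if n = 0 then ['0'] else pvBits n n
  List.replicate (8 - ds.length) '0' ++ ds

-- set_pixel; y & 7 = y % 8 and y // 8 = y / 8 on the nonnegative x, y of this program.
def pvSetPixel (buffer : List Nat) (width x y : Nat) : List Nat :=
  buffer.set (x + y / 8 * width) (buffer.getD (x + y / 8 * width) 0 ||| (1 <<< (y % 8)))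

def pvBufferSize (width height : Nat) : Nat := width * ((height + 7) / 8)

def pvToBuffer (d : String) : List Nat :=
  let wh := pvSplitGlyph d
  let width := wh.1
  let height := wh.2.1
  let lines := wh.2.2
  (lines.foldl
    (fun (st : List Nat × Nat) line =>
      ((line.foldl
          (fun (st2 : List Nat × Nat) c =>
            (if c ≠ ' ' then pvSetPixel st2.1 width st2.2 st.2 else st2.1, st2.2 + 1))
          (st.1, 0)).1,
       st.2 + 1))
    (List.replicate (pvBufferSize width height) 0, 0)).1

def pvFormatSeq (buffer : List Nat) : List Char :=
  '{' :: PySem.Chars.join [',', ' '] (buffer.map (fun i => '0' :: 'b' :: pvBin8 i)) ++ ['}']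

-- str(n) for the nonnegative ints interpolated into the template
def pvNatStr (n : Nat) : List Char := (PySem.Int.toStr (n : Int)).toList

-- the literal text of _TEMPLATE (shared: A fills it via .format, Source B via one f-string
-- with the same interpolations in the same places)
def pvHeader (width height length : Nat) (data : List Char) : List Char :=
  let size := pvNatStr width ++ 'x' :: pvNatStr height
  "#ifndef FONT".toList ++ size ++ "_HPP\n#define FONT".toList ++ size ++
  "_HPP\n\nnamespace font".toList ++ size ++ " {\n  const size_t width = ".toList ++
  pvNatStr width ++ ";\n  const size_t height = ".toList ++ pvNatStr height ++
  ";\n  const uint8_t glyphs[][".toList ++ pvNatStr length ++ "] = ".toList ++ data ++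
  ";\n}\n\n#endif".toList

def render_template (glyphs : List String) : String :=
  let wh := pvSplitGlyph (PySem.List.pyGetD glyphs 0 "")   -- glyphs[0]; [] raises: Pre_
  let width := wh.1
  let height := wh.2.1
  let data := glyphs.map (fun d => pvFormatSeq (pvToBuffer d))
  String.ofList (pvHeader width height (pvBufferSize width height)
    ('{' :: '\n' :: "    ".toList ++ PySem.Chars.join (",\n    ".toList) data ++
      '\n' :: "  }".toList))

-- ===== PORT B =====
-- _glyph_bytes: for each page p and column x, gather the 8 bits MSB-first
-- (for b in range(7, -1, -1), i.e. b = 7 - k) and emit '0b' ++ bits directly.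
def pvGlyphBytes (d : String) : List (List Char) :=
  let wh := pvSplitGlyph d
  let width := wh.1
  let height := wh.2.1
  let lines := wh.2.2
  (List.range ((height + 7) / 8)).flatMap (fun p =>
    (List.range width).map (fun x =>
      '0' :: 'b' :: ((List.range 8).map (fun k =>
        let b := 7 - k
        let y := p * 8 + b
        if y < height ∧ x < (lines.getD y []).length ∧ (lines.getD y []).getD x ' ' ≠ ' '
        then '1' else '0'))))

def render_template_alt (glyphs : List String) : String :=
  let wh := pvSplitGlyph (PySem.List.pyGetD glyphs 0 "")   -- glyphs[0]; [] raises: Pre_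
  let width := wh.1
  let height := wh.2.1
  let body := PySem.Chars.join (",\n    ".toList)
    (glyphs.map (fun d => '{' :: PySem.Chars.join [',', ' '] (pvGlyphBytes d) ++ ['}']))
  String.ofList (pvHeader width height (width * ((height + 7) / 8))
    ('{' :: '\n' :: "    ".toList ++ body ++ '\n' :: "  }".toList))

-- ===== PRECONDITION & SPEC =====
-- Pre_ excludes exactly the inputs on which A raises: an empty glyph list (IndexError on
-- glyphs[0]) and any glyph consisting only of newlines (split_glyph's pop loop empties
-- `lines` and lines[0] raises IndexError).
def Pre_render_template (glyphs : List String) : Prop :=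
  glyphs ≠ [] ∧ glyphs.all (fun d => d.toList.any (fun c => c != '\n')) = true
instance (glyphs : List String) : Decidable (Pre_render_template glyphs) := by
  unfold Pre_render_template; infer_instance

def pvWitness_render_template : List String := ["#"]

def Spec_render_template (glyphs : List String) (out : String) : Prop :=
  out = render_template_alt glyphs
instance (glyphs : List String) (out : String) : Decidable (Spec_render_template glyphs out) := by
  unfold Spec_render_template; infer_instance

-- ===== CLAIM (what is proved, stated in full; the proofs are below) =====
def Claim_equal_render_template : Prop :=
  ∀ (glyphs : List String), Dom_render_template glyphs → Pre_render_template glyphs →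
    Spec_render_template glyphs (render_template glyphs)

-- ===== LEMMAS AND PROOFS =====

-- proof-only model: is pixel x of row l set?
def pvInRow (l : List Char) (x : Nat) : Bool :=
  decide (x < l.length) && (l.getD x ' ' != ' ')

-- proof-only model: the value A's loop leaves at buffer index j after the given rows.
def pvEntry (width j : Nat) : List (List Char) → Nat → Nat → Nat
  | [], _, acc => acc
  | l :: ls, y, acc =>
    pvEntry width j ls (y + 1)
      (if j / width = y / 8 ∧ pvInRow l (j % width) = true then acc ||| (1 <<< (y % 8)) else acc)

lemma pvGetD_set (buf : List Nat) (i v j : Nat) :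
    (buf.set i v).getD j 0 = if i = j ∧ j < buf.length then v else buf.getD j 0 := by
  simp only [List.getD_eq_getElem?_getD, List.getElem?_set]
  split_ifs with h1 h2 h3 h4 <;> simp_all

lemma pvIdxIff (width x q j : Nat) (hx : x < width) :
    j = x + q * width ↔ (j / width = q ∧ j % width = x) := by
  constructor
  · rintro rfl
    constructor
    · rw [Nat.add_mul_div_right _ _ (by omega)]
      simp [Nat.div_eq_of_lt hx]
    · rw [Nat.add_mul_mod_self_right]; exact Nat.mod_eq_of_lt hx
  · rintro ⟨h1, h2⟩
    have h := Nat.div_add_mod j width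
    rw [h1, h2, Nat.mul_comm] at h
    omega

lemma pvRow (width pages y : Nat) (hy : y / 8 < pages) :
    ∀ (cs : List Char) (x0 : Nat) (buf : List Nat),
      buf.length = width * pages → x0 + cs.length ≤ width →
      ((cs.foldl (fun (st2 : List Nat × Nat) c =>
          (if c ≠ ' ' then pvSetPixel st2.1 width st2.2 y else st2.1, st2.2 + 1))
        (buf, x0)).1.length = buf.length ∧
       ∀ j, (cs.foldl (fun (st2 : List Nat × Nat) c =>
          (if c ≠ ' ' then pvSetPixel st2.1 width st2.2 y else st2.1, st2.2 + 1))
        (buf, x0)).1.getD j 0 =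
          if j / width = y / 8 ∧ x0 ≤ j % width ∧ j % width < x0 + cs.length ∧
             (cs.getD (j % width - x0) ' ' ≠ ' ')
          then buf.getD j 0 ||| (1 <<< (y % 8)) else buf.getD j 0) := by
  intro cs
  induction cs with
  | nil =>
    intro x0 buf hlen _
    refine ⟨rfl, fun j => ?_⟩
    rw [if_neg (by simp only [List.length_nil, Nat.add_zero]; rintro ⟨-, h1, h2, -⟩; omega)]
    rfl
  | cons c cs ih =>
    intro x0 buf hlen hw
    have hx0 : x0 < width := by simp only [List.length_cons] at hw; omega
    have hwpos : 0 < width := by omega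
    -- the state after the head step
    have hstep : (List.foldl (fun (st2 : List Nat × Nat) c =>
          (if c ≠ ' ' then pvSetPixel st2.1 width st2.2 y else st2.1, st2.2 + 1))
        (buf, x0) (c :: cs)) = (List.foldl (fun (st2 : List Nat × Nat) c =>
          (if c ≠ ' ' then pvSetPixel st2.1 width st2.2 y else st2.1, st2.2 + 1))
        ((if c ≠ ' ' then pvSetPixel buf width x0 y else buf), x0 + 1) cs) := rfl
    set buf1 := (if c ≠ ' ' then pvSetPixel buf width x0 y else buf) with hbuf1
    have hlen1 : buf1.length = buf.length := by
      rw [hbuf1]; split <;> simp [pvSetPixel]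
    have hib : x0 + y / 8 * width < buf.length := by
      rw [hlen]
      calc x0 + y / 8 * width < width + y / 8 * width := by omega
      _ = (y / 8 + 1) * width := by ring
      _ ≤ pages * width := Nat.mul_le_mul_right _ (by omega)
      _ = width * pages := Nat.mul_comm _ _
    -- characterize buf1
    have hbuf1D : ∀ j, buf1.getD j 0 =
        if j / width = y / 8 ∧ j % width = x0 ∧ c ≠ ' '
        then buf.getD j 0 ||| (1 <<< (y % 8)) else buf.getD j 0 := by
      intro j
      rw [hbuf1]
      by_cases hc : c = ' '
      · simp [hc]
      · rw [if_pos hc, pvSetPixel]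
        rw [pvGetD_set]
        by_cases hj : j = x0 + y / 8 * width
        · have hqr := (pvIdxIff width x0 (y / 8) j hx0).mp hj
          rw [if_pos ⟨hj.symm ▸ rfl, by omega⟩]
          · rw [if_pos ⟨hqr.1, hqr.2, hc⟩, hj]
        · rw [if_neg (by rintro ⟨h1, -⟩; exact hj h1.symm)]
          rw [if_neg]
          rintro ⟨h1, h2, -⟩
          exact hj ((pvIdxIff width x0 (y / 8) j hx0).mpr ⟨h1, h2⟩)
    obtain ⟨ihlen, ihD⟩ := ih (x0 + 1) buf1 (hlen1.trans hlen) (by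
      simp only [List.length_cons] at hw; omega)
    rw [hstep]
    refine ⟨ihlen.trans hlen1, fun j => ?_⟩
    by_cases hq : j / width = y / 8
    · by_cases hx : j % width = x0
      · -- head position: tail loop never touches it again
        have hnoih : ¬ (j / width = y / 8 ∧ x0 + 1 ≤ j % width ∧
            j % width < x0 + 1 + cs.length ∧ cs.getD (j % width - (x0 + 1)) ' ' ≠ ' ') := by
          rintro ⟨-, h', -, -⟩; omega
        by_cases hc : c = ' '
        · have hb1 : buf1.getD j 0 = buf.getD j 0 := by
            rw [hbuf1D j, if_neg (by rintro ⟨-, -, h'⟩; exact h' hc)]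
          rw [ihD j, hb1, if_neg hnoih, if_neg]
          rintro ⟨-, -, -, hg⟩
          rw [hx] at hg
          simp only [Nat.sub_self, List.getD_cons_zero] at hg
          exact hg hc
        · have hb1 : buf1.getD j 0 = buf.getD j 0 ||| (1 <<< (y % 8)) := by
            rw [hbuf1D j, if_pos ⟨hq, hx, hc⟩]
          rw [ihD j, hb1, if_neg hnoih, if_pos]
          refine ⟨hq, by omega, by simp only [List.length_cons]; omega, ?_⟩
          rw [hx]
          simp only [Nat.sub_self, List.getD_cons_zero]
          exact hc
      · -- other positions: head update does not apply
        have hb1 : buf1.getD j 0 = buf.getD j 0 := by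
          rw [hbuf1D j, if_neg (by rintro ⟨-, h', -⟩; exact hx h')]
        rw [ihD j, hb1]
        refine if_congr ⟨fun h => ?_, fun h => ?_⟩ rfl rfl
        · obtain ⟨-, h1, h2, h3⟩ := h
          refine ⟨hq, by omega, by simp only [List.length_cons]; omega, ?_⟩
          have h5 : j % width - x0 = (j % width - (x0 + 1)) + 1 := by omega
          rw [h5, List.getD_cons_succ]
          exact h3
        · obtain ⟨-, h1, h2, h3⟩ := h
          have hgt : x0 + 1 ≤ j % width := by omega
          refine ⟨hq, hgt, by simp only [List.length_cons] at h2; omega, ?_⟩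
          have h5 : j % width - x0 = (j % width - (x0 + 1)) + 1 := by omega
          rw [h5, List.getD_cons_succ] at h3
          exact h3
    · -- wrong page: nothing applies
      have hb1 : buf1.getD j 0 = buf.getD j 0 := by
        rw [hbuf1D j, if_neg (by rintro ⟨h', -⟩; exact hq h')]
      rw [ihD j, hb1, if_neg (by rintro ⟨h', -⟩; exact hq h'),
        if_neg (by rintro ⟨h', -⟩; exact hq h')]

lemma pvRows (width pages : Nat) :
    ∀ (lines : List (List Char)) (y0 : Nat) (buf : List Nat),
      buf.length = width * pages → (∀ l ∈ lines, l.length ≤ width) →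
      y0 + lines.length ≤ 8 * pages →
      ((lines.foldl
          (fun (st : List Nat × Nat) line =>
            ((line.foldl
                (fun (st2 : List Nat × Nat) c =>
                  (if c ≠ ' ' then pvSetPixel st2.1 width st2.2 st.2 else st2.1, st2.2 + 1))
                (st.1, 0)).1,
             st.2 + 1))
          (buf, y0)).1.length = buf.length ∧
       ∀ j, (lines.foldl
          (fun (st : List Nat × Nat) line =>
            ((line.foldl
                (fun (st2 : List Nat × Nat) c =>
                  (if c ≠ ' ' then pvSetPixel st2.1 width st2.2 st.2 else st2.1, st2.2 + 1))
                (st.1, 0)).1,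
             st.2 + 1))
          (buf, y0)).1.getD j 0 = pvEntry width j lines y0 (buf.getD j 0)) := by
  
  intro lines
  induction lines with
  | nil =>
    intro y0 buf hlen _ _
    exact ⟨rfl, fun j => rfl⟩
  | cons l ls ih =>
    intro y0 buf hlen hwid hy
    have hy8 : y0 / 8 < pages := by
      simp only [List.length_cons] at hy; omega
    obtain ⟨rlen, rD⟩ := pvRow width pages y0 hy8 l 0 buf hlen
      (by simpa using hwid l (List.mem_cons_self))
    set buf1 := (l.foldl
        (fun (st2 : List Nat × Nat) c =>
          (if c ≠ ' ' then pvSetPixel st2.1 width st2.2 y0 else st2.1, st2.2 + 1))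
        (buf, 0)).1 with hbuf1
    have hstep : (List.foldl
        (fun (st : List Nat × Nat) line =>
          ((line.foldl
              (fun (st2 : List Nat × Nat) c =>
                (if c ≠ ' ' then pvSetPixel st2.1 width st2.2 st.2 else st2.1, st2.2 + 1))
              (st.1, 0)).1,
           st.2 + 1))
        (buf, y0) (l :: ls)) = (List.foldl
        (fun (st : List Nat × Nat) line =>
          ((line.foldl
              (fun (st2 : List Nat × Nat) c =>
                (if c ≠ ' ' then pvSetPixel st2.1 width st2.2 st.2 else st2.1, st2.2 + 1))
              (st.1, 0)).1,
           st.2 + 1))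
        (buf1, y0 + 1) ls) := rfl
    obtain ⟨ihlen, ihD⟩ := ih (y0 + 1) buf1 (rlen.trans hlen)
      (fun p hp => hwid p (List.mem_cons_of_mem _ hp))
      (by simp only [List.length_cons] at hy; omega)
    rw [hstep]
    refine ⟨ihlen.trans rlen, fun j => ?_⟩
    rw [ihD j, pvEntry]
    congr 1
    rw [rD j]
    by_cases hcond : j / width = y0 / 8 ∧ pvInRow l (j % width) = true
    · rw [if_pos hcond]
      rw [if_pos]
      obtain ⟨h1, h2⟩ := hcond
      simp only [pvInRow, Bool.and_eq_true, decide_eq_true_eq, bne_iff_ne] at h2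
      exact ⟨h1, by omega, by simpa using h2.1, by simpa using h2.2⟩
    · rw [if_neg hcond, if_neg]
      rintro ⟨h1, -, h3, h4⟩
      exact hcond ⟨h1, by
        simp only [pvInRow, Bool.and_eq_true, decide_eq_true_eq, bne_iff_ne]
        exact ⟨by simpa using h3, by simpa using h4⟩⟩
lemma pvEntry_lt (width j : Nat) :
    ∀ (lines : List (List Char)) (y0 acc : Nat), acc < 256 →
      pvEntry width j lines y0 acc < 256 := by
  intro lines
  induction lines with
  | nil => intro y0 acc h; exact h
  | cons l ls ih =>
    intro y0 acc h
    apply ih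
    split
    · have h1 : (1 <<< (y0 % 8)) < 256 := by
        rw [Nat.one_shiftLeft]
        calc 2 ^ (y0 % 8) < 2 ^ 8 := Nat.pow_lt_pow_right (by norm_num) (by omega)
        _ = 256 := by norm_num
      have h2 := Nat.or_lt_two_pow (n := 8) (by simpa using h) (by simpa using h1)
      simpa using h2
    · exact h

lemma pvEntry_testBit (width j : Nat) :
    ∀ (lines : List (List Char)) (y0 acc b : Nat), b < 8 →
      (pvEntry width j lines y0 acc).testBit b =
        (acc.testBit b ||
          (decide (y0 ≤ j / width * 8 + b) && decide (j / width * 8 + b < y0 + lines.length) &&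
           pvInRow (lines.getD (j / width * 8 + b - y0) []) (j % width))) := by
  intro lines
  induction lines with
  | nil =>
    intro y0 acc b hb
    simp only [pvEntry, List.length_nil, Nat.add_zero, List.getD_nil]
    have h : ¬ (y0 ≤ j / width * 8 + b ∧ j / width * 8 + b < y0) := by omega
    rcases Decidable.not_and_iff_not_or_not.mp h with h' | h' <;>
      simp [decide_eq_false h']
  | cons l ls ih =>
    intro y0 acc b hb
    rw [pvEntry, ih _ _ _ hb]
    have hsplit : (if j / width = y0 / 8 ∧ pvInRow l (j % width) = true then
        acc ||| (1 <<< (y0 % 8)) else acc).testBit b =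
        (acc.testBit b || (decide (j / width * 8 + b = y0) && pvInRow l (j % width))) := by
      by_cases hc : j / width = y0 / 8 ∧ pvInRow l (j % width) = true
      · rw [if_pos hc]
        simp only [Nat.testBit_lor, Nat.one_shiftLeft, Nat.testBit_two_pow]
        by_cases hYy : j / width * 8 + b = y0
        · have h8 : y0 % 8 = b := by omega
          simp [h8, hc.2, hYy]
        · have h8 : ¬ (y0 % 8 = b) := by
            intro h8
            exact hYy (by obtain ⟨h1, -⟩ := hc; omega)
          simp [h8, hYy]
      · rw [if_neg hc]
        by_cases hYy : j / width * 8 + b = y0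
        · have h1 : j / width = y0 / 8 := by omega
          have h2 : pvInRow l (j % width) = false := by
            cases hrow : pvInRow l (j % width)
            · rfl
            · exact absurd ⟨h1, hrow⟩ hc
          simp [hYy, h2]
        · simp [hYy]
    rw [hsplit]
    by_cases hYy : j / width * 8 + b = y0
    · have hd1 : decide (y0 + 1 ≤ j / width * 8 + b) = false := by
        simp only [decide_eq_false_iff_not]; omega
      have hd2 : decide (y0 ≤ j / width * 8 + b) = true := by
        simp only [decide_eq_true_eq]; omega
      have hd3 : decide (j / width * 8 + b < y0 + (l :: ls).length) = true := by
        simp only [decide_eq_true_eq, List.length_cons]; omega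
      have hd4 : j / width * 8 + b - y0 = 0 := by omega
      simp [hd4, hYy]
    · have hd0 : decide (j / width * 8 + b = y0) = false := by
        simp only [decide_eq_false_iff_not]; exact hYy
      rw [hd0]
      simp only [Bool.false_and, Bool.or_false]
      congr 1
      by_cases hin : y0 + 1 ≤ j / width * 8 + b ∧ j / width * 8 + b < y0 + 1 + ls.length
      · have h1 : decide (y0 ≤ j / width * 8 + b) = true := by
          simp only [decide_eq_true_eq]; omega
        have h2 : decide (j / width * 8 + b < y0 + (l :: ls).length) = true := by
          simp only [decide_eq_true_eq, List.length_cons]; omega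
        have h3 : decide (y0 + 1 ≤ j / width * 8 + b) = true := by
          simp only [decide_eq_true_eq]; omega
        have h4 : decide (j / width * 8 + b < y0 + 1 + ls.length) = true := by
          simp only [decide_eq_true_eq]; omega
        have hgd : (l :: ls).getD (j / width * 8 + b - y0) [] =
            ls.getD (j / width * 8 + b - (y0 + 1)) [] := by
          have h5 : j / width * 8 + b - y0 = (j / width * 8 + b - (y0 + 1)) + 1 := by omega
          rw [h5, List.getD_cons_succ]
        rw [hgd, h1, h2, h3, h4]
      · rcases Decidable.not_and_iff_not_or_not.mp hin with h | h
        · have h1 : decide (y0 + 1 ≤ j / width * 8 + b) = false := by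
            simp only [decide_eq_false_iff_not]; omega
          have h2 : decide (y0 ≤ j / width * 8 + b) = false := by
            simp only [decide_eq_false_iff_not]; omega
          simp only [h1, h2, Bool.false_and]
        · have h1 : decide (j / width * 8 + b < y0 + 1 + ls.length) = false := by
            simp only [decide_eq_false_iff_not]; omega
          have h2 : decide (j / width * 8 + b < y0 + (l :: ls).length) = false := by
            simp only [decide_eq_false_iff_not, List.length_cons]; omega
          simp only [h1, h2, Bool.and_false, Bool.false_and]

set_option maxRecDepth 8192 in
lemma pvBin8_eq : ∀ n < 256,
    pvBin8 n = (List.range 8).map (fun k => if n.testBit (7 - k) then '1' else '0') := by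
  decide

lemma pvFlatMapRange {β : Type} (w : Nat) (hw : 0 < w) :
    ∀ (m : Nat) (f : Nat → Nat → β),
      (List.range m).flatMap (fun p => (List.range w).map (fun x => f p x)) =
        (List.range (w * m)).map (fun j => f (j / w) (j % w)) := by
  intro m
  induction m with
  | zero => simp
  | succ m ih =>
    intro f
    rw [List.range_succ, List.flatMap_append, ih f, Nat.mul_succ, List.range_add,
      List.map_append]
    congr 1
    simp only [List.flatMap_cons, List.flatMap_nil, List.append_nil, List.map_map]
    refine List.map_congr_left (fun x hx => ?_)
    have hxw : x < w := List.mem_range.mp hx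
    simp only [Function.comp_apply]
    rw [Nat.mul_add_div hw, Nat.mul_add_mod, Nat.div_eq_of_lt hxw, Nat.mod_eq_of_lt hxw,
      Nat.add_zero]

lemma pvGo_mem (c : Char) (hc : c ≠ '\n') :
    ∀ (fuel : Nat) (l cur : List Char) (acc : List (List Char)),
      (c ∈ l ∨ c ∈ cur ∨ ∃ p ∈ acc, c ∈ p) →
      ∃ p ∈ PySem.Chars.splitOn.go ['\n'] fuel l cur acc, c ∈ p := by
  intro fuel
  induction fuel with
  | zero =>
    intro l cur acc h
    rw [PySem.Chars.splitOn.go.eq_def]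
    rcases h with h | h | ⟨p, hp, hcp⟩
    · exact ⟨cur.reverse ++ l, by simp, by simp [h]⟩
    · exact ⟨cur.reverse ++ l, by simp, by simp [h]⟩
    · exact ⟨p, by simp [hp], hcp⟩
  | succ fuel ih =>
    intro l cur acc h
    rw [PySem.Chars.splitOn.go.eq_def]
    match l with
    | [] =>
      rcases h with h | h | ⟨p, hp, hcp⟩
      · cases h
      · exact ⟨cur.reverse, by simp, by simp [h]⟩
      · exact ⟨p, by simp [hp], hcp⟩
    | a :: rest =>
      by_cases hpre : List.isPrefixOf ['\n'] (a :: rest)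
      · have ha : a = '\n' := by
          have h' := hpre
          simp only [List.isPrefixOf, Bool.and_true, beq_iff_eq] at h'
          exact h'.symm
        simp only [if_pos hpre]
        apply ih
        rcases h with h | h | ⟨p, hp, hcp⟩
        · rcases List.mem_cons.mp h with rfl | h'
          · exact absurd ha hc
          · exact Or.inl (by simpa using h')
        · exact Or.inr (Or.inr ⟨cur.reverse, by simp, by simp [h]⟩)
        · exact Or.inr (Or.inr ⟨p, by simp [hp], hcp⟩)
      · simp only [if_neg hpre]
        apply ih
        rcases h with h | h | ⟨p, hp, hcp⟩
        · rcases List.mem_cons.mp h with rfl | h'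
          · exact Or.inr (Or.inl (by simp))
          · exact Or.inl h'
        · exact Or.inr (Or.inl (by simp [h]))
        · exact Or.inr (Or.inr ⟨p, hp, hcp⟩)

lemma pvDropEmpty_nonempty :
    ∀ (L : List (List Char)), (∃ p ∈ L, p ≠ []) →
      ∃ l ls, pvDropEmpty L = l :: ls ∧ l ≠ [] := by
  intro L
  induction L with
  | nil => rintro ⟨p, hp, _⟩; cases hp
  | cons l ls ih =>
    rintro ⟨p, hp, hpne⟩
    by_cases hl : l = []
    · simp only [pvDropEmpty, if_pos hl]
      apply ih
      rcases List.mem_cons.mp hp with rfl | h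
      · exact absurd hl hpne
      · exact ⟨p, h, hpne⟩
    · exact ⟨l, ls, by simp [pvDropEmpty, hl], hl⟩

lemma pvMaxLen_ge' : ∀ (lines : List (List Char)) (a : Nat),
    (∀ l ∈ lines, l.length ≤ lines.foldl (fun acc l => max acc l.length) a) ∧
    a ≤ lines.foldl (fun acc l => max acc l.length) a := by
  intro lines
  induction lines with
  | nil => simp
  | cons l ls ih =>
    intro a
    simp only [List.foldl_cons, List.mem_cons]
    refine ⟨?_, le_trans (le_max_left _ _) (ih _).2⟩
    rintro p (rfl | hp)
    · exact le_trans (le_max_right _ _) (ih _).2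
    · exact (ih (max a l.length)).1 p hp

lemma pvMaxLen_ge (lines : List (List Char)) (l : List Char) (h : l ∈ lines) :
    l.length ≤ pvMaxLen lines :=
  (pvMaxLen_ge' lines 0).1 l h

lemma pvSplitGlyph_facts (d : String) (hd : ∃ c ∈ d.toList, c ≠ '\n') :
    ∃ lines : List (List Char), pvSplitGlyph d = (pvMaxLen lines, lines.length, lines) ∧
      0 < pvMaxLen lines := by
  
  obtain ⟨c, hcmem, hc⟩ := hd
  have hgo := pvGo_mem c hc (d.toList.length + 1) d.toList [] [] (Or.inl hcmem)
  have hsp : ∃ p ∈ PySem.Chars.splitOn d.toList ['\n'], c ∈ p := by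
    rw [PySem.Chars.splitOn]
    exact hgo
  obtain ⟨p, hpmem, hcp⟩ := hsp
  have hnonnil : PySem.Chars.splitOn d.toList ['\n'] ≠ [] := by
    intro h; rw [h] at hpmem; cases hpmem
  obtain ⟨l, ls, hde, hlne⟩ := pvDropEmpty_nonempty _
    ⟨p, hpmem, fun h => by subst h; cases hcp⟩
  refine ⟨l :: ls, ?_, ?_⟩
  · unfold pvSplitGlyph
    rw [if_neg (by simpa using hnonnil), hde]
  · have h1 := pvMaxLen_ge (l :: ls) l List.mem_cons_self
    have h2 : 0 < l.length := List.length_pos_of_ne_nil hlne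
    omega
lemma pvReplicate_getD (n j : Nat) : (List.replicate n (0 : Nat)).getD j 0 = 0 := by
  simp only [List.getD_eq_getElem?_getD, List.getElem?_replicate]
  split <;> rfl

lemma pvPerGlyph (d : String) (hd : ∃ c ∈ d.toList, c ≠ '\n') :
    (pvToBuffer d).map (fun i => '0' :: 'b' :: pvBin8 i) = pvGlyphBytes d := by
  obtain ⟨lines, hsg, hwpos⟩ := pvSplitGlyph_facts d hd
  have hkey : ∀ j : Nat,
      '0' :: 'b' :: pvBin8 (pvEntry (pvMaxLen lines) j lines 0 0) =
      '0' :: 'b' :: (List.range 8).map (fun k =>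
        if j / pvMaxLen lines * 8 + (7 - k) < lines.length ∧
           j % pvMaxLen lines < (lines.getD (j / pvMaxLen lines * 8 + (7 - k)) []).length ∧
           (lines.getD (j / pvMaxLen lines * 8 + (7 - k)) []).getD (j % pvMaxLen lines) ' ' ≠ ' '
        then '1' else '0') := by
    intro j
    rw [pvBin8_eq _ (pvEntry_lt (pvMaxLen lines) j lines 0 0 (by norm_num))]
    congr 2
    refine List.map_congr_left (fun k _ => ?_)
    rw [pvEntry_testBit (pvMaxLen lines) j lines 0 0 (7 - k) (by omega)]
    simp only [Nat.zero_testBit, Bool.false_or, Nat.zero_add, Nat.sub_zero, pvInRow]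
    refine if_congr ?_ rfl rfl
    simp only [Bool.and_eq_true, decide_eq_true_eq, bne_iff_ne]
    exact ⟨fun h => ⟨h.1.2, h.2⟩, fun h => ⟨⟨Nat.zero_le _, h.1⟩, h.2⟩⟩
  obtain ⟨hlen, hD⟩ := pvRows (pvMaxLen lines) ((lines.length + 7) / 8) lines 0
    (List.replicate (pvMaxLen lines * ((lines.length + 7) / 8)) 0)
    (by simp) (fun l hl => pvMaxLen_ge lines l hl) (by omega)
  have hA : pvToBuffer d = (List.range (pvMaxLen lines * ((lines.length + 7) / 8))).map
      (fun j => pvEntry (pvMaxLen lines) j lines 0 0) := by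
    simp only [pvToBuffer, pvBufferSize, hsg]
    apply List.ext_getElem
    · rw [hlen]; simp
    · intro i h1 h2
      have h3 := hD i
      rw [pvReplicate_getD] at h3
      rw [List.getElem_map, List.getElem_range]
      rw [← List.getD_eq_getElem _ 0 h1]
      exact h3
  have hB : pvGlyphBytes d = (List.range (pvMaxLen lines * ((lines.length + 7) / 8))).map
      (fun j => '0' :: 'b' :: (List.range 8).map (fun k =>
        if j / pvMaxLen lines * 8 + (7 - k) < lines.length ∧
           j % pvMaxLen lines < (lines.getD (j / pvMaxLen lines * 8 + (7 - k)) []).length ∧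
           (lines.getD (j / pvMaxLen lines * 8 + (7 - k)) []).getD (j % pvMaxLen lines) ' ' ≠ ' '
        then '1' else '0')) := by
    simp only [pvGlyphBytes, hsg]
    rw [pvFlatMapRange (pvMaxLen lines) hwpos ((lines.length + 7) / 8)]
  rw [hA, hB, List.map_map]
  refine List.map_congr_left (fun j _ => ?_)
  exact hkey j
-- ===== VERDICT (by name: the statement is the Claim_ definition above) =====
theorem render_template_spec : Claim_equal_render_template := by
  intro glyphs _hdom hpre
  obtain ⟨_hne, hall'⟩ := hpre
  have hall : ∀ d ∈ glyphs, ∃ c ∈ d.toList, c ≠ '\n' := by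
    rw [List.all_eq_true] at hall'
    intro d hd
    have h1 := hall' d hd
    rw [List.any_eq_true] at h1
    obtain ⟨c, hc1, hc2⟩ := h1
    exact ⟨c, hc1, by simpa using hc2⟩
  have hdata : glyphs.map (fun d => pvFormatSeq (pvToBuffer d)) =
      glyphs.map (fun d => '{' :: PySem.Chars.join [',', ' '] (pvGlyphBytes d) ++ ['}']) :=
    List.map_congr_left (fun d hd => by
      show pvFormatSeq (pvToBuffer d) = _
      unfold pvFormatSeq
      rw [pvPerGlyph d (hall d hd)])
  show render_template glyphs = render_template_alt glyphs
  simp only [render_template, render_template_alt, pvBufferSize]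
  rw [hdata]
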